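-- pv_equiv track=rewrite | github.com/sjifire/utilities | src/sjifire/ops/chat/routes.py | _group_action_codes
-- ===== SOURCE A (Python) =====
-- def _group_action_codes(codes: list[str]) -> list[tuple[str, list[str]]]:
--     """Group ``CATEGORY||sub||detail`` action codes by primary category."""
--     groups: dict[str, list[str]] = {}
--     order: list[str] = []
--     for code in codes:
--         parts = code.split("||")
--         category = parts[0].replace("_", " ").title()
--         if category not in groups:
--             groups[category] = []
--             order.append(category)
--         if len(parts) > 1:
--             sub = " > ".join(p.replace("_", " ").title() for p in parts[1:])
--             if sub not in groups[category]:
--                 groups[category].append(sub)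
--     return [(cat, groups[cat]) for cat in order]
-- ===== SOURCE B (Python) =====
-- def _group_action_codes(codes: list[str]) -> list[tuple[str, list[str]]]:
--     """Collect-then-dedup: first gather all subs per category (duplicates kept),
--     then dedup each list once with dict.fromkeys."""
--     groups: dict[str, list[str]] = {}
--     for code in codes:
--         parts = code.split("||")
--         category = parts[0].replace("_", " ").title()
--         subs = groups.setdefault(category, [])
--         if len(parts) > 1:
--             subs.append(" > ".join(p.replace("_", " ").title() for p in parts[1:]))
--     return [(cat, list(dict.fromkeys(subs))) for cat, subs in groups.items()]
-- ===== Notes on version B (the rewrite author's own statement) =====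
-- stated objective: alternative
-- what changed: A dedups subcategories as it goes and keeps a separate order list; B collects all subcategories per category (duplicates included) into a dict relying on insertion order, then dedups each list once with dict.fromkeys in a second pass.
import Mathlib
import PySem

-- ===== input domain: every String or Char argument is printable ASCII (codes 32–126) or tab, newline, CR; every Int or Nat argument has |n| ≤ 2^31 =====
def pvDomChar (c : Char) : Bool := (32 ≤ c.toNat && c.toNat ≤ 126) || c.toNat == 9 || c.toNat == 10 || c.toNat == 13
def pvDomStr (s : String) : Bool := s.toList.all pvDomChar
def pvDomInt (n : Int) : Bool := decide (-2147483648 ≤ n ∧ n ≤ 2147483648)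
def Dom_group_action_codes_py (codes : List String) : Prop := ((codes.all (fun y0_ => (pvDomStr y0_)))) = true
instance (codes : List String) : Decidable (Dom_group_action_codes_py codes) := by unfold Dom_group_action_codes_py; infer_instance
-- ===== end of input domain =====

-- B collects all subcategories per category first and dedups each list in a second pass
-- (dict.fromkeys), instead of A's dedup-as-you-go with a separate order list ("alternative").


-- ===== PORT A =====
-- str.title(), hand-ported over List Char (exact on ASCII: "cased" = isalpha there);
-- `prev` tracks whether the previous character was cased.
def pvTitleGo : Bool → List Char → List Char
  | _, [] => []
  | prev, c :: cs =>
    if PySem.Chars.isalpha c then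
      (if prev then PySem.Chars.lowerChar c else PySem.Chars.upperChar c) :: pvTitleGo true cs
    else c :: pvTitleGo false cs

-- p.replace("_", " ").title()
def pvNorm (p : String) : String :=
  String.ofList (pvTitleGo false (PySem.Str.replace p "_" " ").toList)

-- one iteration of A's loop; state = (groups, order)
def pvAStep (st : PySem.Dict String (List String) × List String) (code : String) :
    PySem.Dict String (List String) × List String :=
  let parts := (PySem.Str.split? code "||").getD []   -- sep "||" ≠ "", never none
  let category := pvNorm (parts.headD "")             -- split is never empty
  let st' := if st.1.contains category then st
             else (st.1.insert category [], st.2 ++ [category])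
  if parts.length > 1 then
    let sub := PySem.Str.join " > " (parts.tail.map pvNorm)
    if (st'.1.getD category []).contains sub then st'
    else (st'.1.modify category [] (· ++ [sub]), st'.2)
  else st'

def group_action_codes_py (codes : List String) : List (String × List String) :=
  let st := codes.foldl pvAStep (PySem.Dict.empty, [])
  st.2.map (fun cat => (cat, st.1.getD cat []))

-- ===== PORT B =====
-- one iteration of B's loop: setdefault, then append (duplicates kept)
def pvBStep (groups : PySem.Dict String (List String)) (code : String) :
    PySem.Dict String (List String) :=
  let parts := (PySem.Str.split? code "||").getD []
  let category := pvNorm (parts.headD "")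
  let groups' := groups.setdefault category []
  if parts.length > 1 then
    groups'.modify category [] (· ++ [PySem.Str.join " > " (parts.tail.map pvNorm)])
  else groups'

-- list(dict.fromkeys(l)): first-occurrence order-preserving dedup
def pvFromKeys : List String → List String
  | [] => []
  | x :: xs => x :: pvFromKeys (xs.filter (fun y => !(y == x)))
termination_by l => l.length
decreasing_by simp; exact le_trans (List.length_filter_le _ _) (by simp)

def group_action_codes_py_alt (codes : List String) : List (String × List String) :=
  let groups := codes.foldl pvBStep PySem.Dict.empty
  groups.items.map (fun p => (p.1, pvFromKeys p.2))

-- ===== PRECONDITION & SPEC =====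
def Spec_group_action_codes_py (codes : List String) (out : List (String × List String)) : Prop := out = group_action_codes_py_alt codes
instance (codes : List String) (out : List (String × List String)) : Decidable (Spec_group_action_codes_py codes out) := by unfold Spec_group_action_codes_py; infer_instance

-- ===== CLAIM (what is proved, stated in full; the proofs are below) =====
def Claim_equal_group_action_codes_py : Prop := ∀ (codes : List String), Dom_group_action_codes_py codes → Spec_group_action_codes_py codes (group_action_codes_py codes)

-- ===== LEMMAS AND PROOFS =====

theorem mem_pvFromKeys (l : List String) (s : String) : s ∈ pvFromKeys l ↔ s ∈ l := by
  match l with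
  | [] => simp [pvFromKeys]
  | x :: xs =>
    have ih := mem_pvFromKeys (xs.filter (fun y => !(y == x))) s
    by_cases h : s = x
    · simp [pvFromKeys, h]
    · simp only [pvFromKeys, List.mem_cons, ih, List.mem_filter]
      simp [h]
termination_by l.length
decreasing_by simp; exact le_trans (List.length_filter_le _ _) (by simp)

theorem pvFromKeys_append (l : List String) (s : String) :
    pvFromKeys (l ++ [s]) = if s ∈ l then pvFromKeys l else pvFromKeys l ++ [s] := by
  match l with
  | [] => simp [pvFromKeys]
  | x :: xs =>
    have ih := pvFromKeys_append (xs.filter (fun y => !(y == x))) s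
    by_cases h : s = x
    · subst h
      simp [pvFromKeys, List.filter_append]
    · have hs : ((s : String) == x) = false := by simp [h]
      simp only [List.cons_append, pvFromKeys, List.filter_append, List.filter_cons,
        List.filter_nil, hs, Bool.not_false, if_true]
      rw [ih]
      by_cases hm : s ∈ xs
      · have hf : s ∈ xs.filter (fun y => !(y == x)) := by
          simp [List.mem_filter, hm, h]
        simp [hf, hm, h]
      · have hf : s ∉ xs.filter (fun y => !(y == x)) := by
          intro hc; exact hm (List.mem_of_mem_filter hc)
        simp [hf, hm, h]
termination_by l.length
decreasing_by simp; exact le_trans (List.length_filter_le _ _) (by simp)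

-- the loop invariant relating A's state (g, ord) with B's dict d
def pvInv (g : PySem.Dict String (List String)) (ord : List String)
    (d : PySem.Dict String (List String)) : Prop :=
  ord = d.keys ∧ d.keys.Nodup ∧
  (∀ c, g.contains c = d.contains c) ∧
  (∀ c, g.getD c [] = pvFromKeys (d.getD c []))

theorem pvStep_inv (g : PySem.Dict String (List String)) (ord : List String)
    (d : PySem.Dict String (List String)) (code : String) (h : pvInv g ord d) :
    pvInv (pvAStep (g, ord) code).1 (pvAStep (g, ord) code).2 (pvBStep d code) := by
  obtain ⟨hord, hnd, hcont, hgetD⟩ := h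
  unfold pvAStep pvBStep
  simp only
  set parts := (PySem.Str.split? code "||").getD [] with hparts
  set category := pvNorm (parts.headD "") with hcat
  set sub := PySem.Str.join " > " (parts.tail.map pvNorm) with hsub
  by_cases hc : d.contains category = true
  · have hgc : g.contains category = true := by rw [hcont]; exact hc
    rw [PySem.Dict.setdefault_of_contains _ _ hc]
    simp only [if_pos hgc]
    by_cases hlen : parts.length > 1
    · simp only [if_pos hlen]
      by_cases hin : sub ∈ d.getD category []
      · have hcs : (g.getD category []).contains sub = true := by
          rw [hgetD category, List.contains_iff_mem, mem_pvFromKeys]; exact hin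
        rw [if_pos hcs]
        refine ⟨?_, ?_, ?_, ?_⟩
        · rw [hord, PySem.Dict.keys_modify, PySem.Dict.keys_insert_of_contains _ _ hc]
        · rw [PySem.Dict.keys_modify, PySem.Dict.keys_insert_of_contains _ _ hc]; exact hnd
        · intro c
          rw [hcont c, PySem.Dict.contains_modify]
          by_cases hce : c = category
          · simp [hce, hc]
          · simp [hce]
        · intro c
          rw [hgetD c, PySem.Dict.getD_modify]
          by_cases hce : c = category
          · rw [if_pos hce, hce, pvFromKeys_append, if_pos hin]
          · rw [if_neg hce]
      · have hng : sub ∉ g.getD category [] := by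
          rw [hgetD category, mem_pvFromKeys]; exact hin
        have hcs : (g.getD category []).contains sub = false := by
          rw [Bool.eq_false_iff]
          intro hcontr; exact hng (List.contains_iff_mem.mp hcontr)
        rw [if_neg (by rw [hcs]; simp)]
        refine ⟨?_, ?_, ?_, ?_⟩
        · rw [hord, PySem.Dict.keys_modify, PySem.Dict.keys_insert_of_contains _ _ hc]
        · rw [PySem.Dict.keys_modify, PySem.Dict.keys_insert_of_contains _ _ hc]; exact hnd
        · intro c
          rw [PySem.Dict.contains_modify, hcont c, PySem.Dict.contains_modify]
        · intro c
          rw [PySem.Dict.getD_modify, PySem.Dict.getD_modify]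
          by_cases hce : c = category
          · rw [if_pos hce, if_pos hce, hgetD category, pvFromKeys_append, if_neg hin]
          · rw [if_neg hce, if_neg hce, hgetD c]
    · simp only [if_neg hlen]
      exact ⟨hord, hnd, hcont, hgetD⟩
  · have hc' : d.contains category = false := by simpa using hc
    have hgc : ¬ g.contains category = true := by rw [hcont]; exact hc
    rw [PySem.Dict.setdefault_of_not_contains _ _ hc']
    simp only [if_neg hgc]
    have hkeys : (d.insert category []).keys = d.keys ++ [category] :=
      PySem.Dict.keys_insert_of_not_contains _ _ hc'
    have hci : (d.insert category []).contains category = true := by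
      rw [PySem.Dict.contains_insert]; simp
    have hnd' : (d.insert category []).keys.Nodup := by
      rw [hkeys]
      refine List.Nodup.append hnd (List.nodup_singleton _) ?_
      intro a ha hb
      simp only [List.mem_singleton] at hb
      subst hb
      exact absurd ((PySem.Dict.contains_iff_mem_keys _ _).2 ha) (by simp [hc'])
    have hcont' : ∀ c, (g.insert category []).contains c = (d.insert category []).contains c := by
      intro c
      rw [PySem.Dict.contains_insert, PySem.Dict.contains_insert, hcont c]
    have hgetD' : ∀ c, (g.insert category []).getD c [] =
        pvFromKeys ((d.insert category []).getD c []) := by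
      intro c
      rw [PySem.Dict.getD_insert, PySem.Dict.getD_insert]
      by_cases hce : c = category
      · simp [hce, pvFromKeys]
      · simp [hce, hgetD c]
    by_cases hlen : parts.length > 1
    · simp only [if_pos hlen]
      have hin : sub ∉ (d.insert category []).getD category [] := by
        rw [PySem.Dict.getD_insert]; simp
      have hng : sub ∉ (g.insert category []).getD category [] := by
        rw [hgetD' category, mem_pvFromKeys]; exact hin
      have hcs : ((g.insert category []).getD category []).contains sub = false := by
        rw [Bool.eq_false_iff]
        intro hcontr; exact hng (List.contains_iff_mem.mp hcontr)
      rw [if_neg (by rw [hcs]; simp)]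
      refine ⟨?_, ?_, ?_, ?_⟩
      · rw [hord, PySem.Dict.keys_modify, PySem.Dict.keys_insert_of_contains _ _ hci, hkeys]
      · rw [PySem.Dict.keys_modify, PySem.Dict.keys_insert_of_contains _ _ hci]; exact hnd'
      · intro c
        rw [PySem.Dict.contains_modify, hcont' c, PySem.Dict.contains_modify]
      · intro c
        rw [PySem.Dict.getD_modify, PySem.Dict.getD_modify]
        by_cases hce : c = category
        · rw [if_pos hce, if_pos hce, hgetD' category, pvFromKeys_append, if_neg hin]
        · rw [if_neg hce, if_neg hce, hgetD' c]
    · simp only [if_neg hlen]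
      exact ⟨by rw [hord, hkeys], hnd', hcont', hgetD'⟩

theorem pvFold_inv (codes : List String) (g : PySem.Dict String (List String))
    (ord : List String) (d : PySem.Dict String (List String)) (h : pvInv g ord d) :
    pvInv (codes.foldl pvAStep (g, ord)).1 (codes.foldl pvAStep (g, ord)).2
      (codes.foldl pvBStep d) := by
  induction codes generalizing g ord d with
  | nil => exact h
  | cons c cs ih =>
    simp only [List.foldl_cons]
    have hstep := pvStep_inv g ord d c h
    have hpair : pvAStep (g, ord) c = ((pvAStep (g, ord) c).1, (pvAStep (g, ord) c).2) := rfl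
    rw [hpair]
    exact ih _ _ _ hstep

-- ===== VERDICT (by name: the statement is the Claim_ definition above) =====
theorem group_action_codes_py_spec : Claim_equal_group_action_codes_py := by
  intro codes _
  unfold Spec_group_action_codes_py group_action_codes_py group_action_codes_py_alt
  have hinit : pvInv PySem.Dict.empty [] PySem.Dict.empty :=
    ⟨by simp [PySem.Dict.keys_empty], by simp [PySem.Dict.keys_empty],
     fun c => rfl, fun c => by rw [PySem.Dict.getD_empty]; simp [pvFromKeys]⟩
  obtain ⟨hord, hnd, _, hgetD⟩ := pvFold_inv codes PySem.Dict.empty [] PySem.Dict.empty hinit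
  set st := codes.foldl pvAStep (PySem.Dict.empty, []) with hst
  set dB := codes.foldl pvBStep PySem.Dict.empty with hd
  simp only
  rw [PySem.Dict.items_eq_map_keys dB hnd [], List.map_map, hord]
  refine List.map_congr_left (fun c _ => ?_)
  simp [hgetD c]
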